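-- pv_equiv track=rewrite | github.com/S0ngRu1/data-factory-songrui-job | app/model/generate_erner_dataset_ci.py | group_annotations
-- ===== SOURCE A (Python) =====
-- from typing import List, Dict, Tuple
--
-- def group_annotations(sorted_anns: List[Dict], boundary_type: str) -> List[List[Dict]]:
--     """
--     根据边界类型将标注分组：
--     - 如果遇到标注类型为 boundary_type，则认为是一个新组的起始点；
--     - 否则，归入当前组。
--     返回各组的标注列表。
--     """
--     groups = []
--     current_group = []
--     for ann in sorted_anns:
--         ann_type = ann["value"].get("labels")[0]
--         if ann_type == boundary_type:
--             if current_group: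
--                 groups.append(current_group)
--             current_group = [ann]
--         else:
--             if not current_group:
--                 current_group = [ann]
--             else:
--                 current_group.append(ann)
--     if current_group:
--         groups.append(current_group)
--     return groups
-- ===== SOURCE B (Python) =====
-- from typing import List, Dict
--
-- def group_annotations(sorted_anns: List[Dict], boundary_type: str) -> List[List[Dict]]:
--     # Precompute which annotations are boundaries (same left-to-right label
--     # extraction as the original, so any KeyError/TypeError/IndexError fires
--     # identically), then cut the list into slices: each group runs from one
--     # position to the next boundary index.
--     is_boundary = [ann["value"].get("labels")[0] == boundary_type for ann in sorted_anns]
--     groups = []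
--     i, n = 0, len(sorted_anns)
--     while i < n:
--         j = i + 1
--         while j < n and not is_boundary[j]:
--             j += 1
--         groups.append(sorted_anns[i:j])
--         i = j
--     return groups
-- ===== Notes on version B (the rewrite author's own statement) =====
-- stated objective: alternative
-- what changed: Replaces the fold that threads (groups, current_group) accumulators and appends element-by-element with an index-slicing pass: precompute the boundary flags, then cut the list into maximal slices starting at each group head.
import Mathlib
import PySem

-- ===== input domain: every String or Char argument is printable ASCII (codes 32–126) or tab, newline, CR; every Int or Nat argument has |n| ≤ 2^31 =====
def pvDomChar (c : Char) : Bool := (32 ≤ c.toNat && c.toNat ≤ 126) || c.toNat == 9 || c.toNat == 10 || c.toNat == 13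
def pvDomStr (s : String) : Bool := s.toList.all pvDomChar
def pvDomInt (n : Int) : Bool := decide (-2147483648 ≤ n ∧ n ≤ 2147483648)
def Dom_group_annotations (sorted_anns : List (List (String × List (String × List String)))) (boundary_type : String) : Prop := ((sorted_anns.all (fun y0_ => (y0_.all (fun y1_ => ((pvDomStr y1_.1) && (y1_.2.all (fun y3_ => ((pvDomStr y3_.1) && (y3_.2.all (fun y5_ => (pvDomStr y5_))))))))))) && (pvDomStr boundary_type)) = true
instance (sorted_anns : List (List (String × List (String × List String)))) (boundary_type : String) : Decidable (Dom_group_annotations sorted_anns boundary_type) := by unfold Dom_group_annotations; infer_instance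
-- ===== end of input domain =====

-- B replaces A's fold over (groups, current_group) accumulators with an index/slice
-- pass (precomputed boundary flags, each group is a maximal slice); alternative
-- decomposition, same cost. Equivalence proved on Pre_ (label lookup succeeds).


-- shared helper: ann["value"].get("labels")[0]; both Pythons extract the label with
-- this exact expression.  none = the Python raises (KeyError / TypeError / IndexError);
-- Pre_ excludes those inputs, so the `.getD ""` default below is never reached there.
def annLabel? (ann : List (String × List (String × List String))) : Option String :=
  match List.lookup "value" ann with
  | none => none
  | some v =>
    match List.lookup "labels" v with
    | none => none
    | some ls => PySem.List.pyGet? ls 0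

def annLabelD (ann : List (String × List (String × List String))) : String :=
  (annLabel? ann).getD ""

-- ===== PORT A =====
-- the for-loop over sorted_anns threading (groups, current_group)
def groupStep (boundary_type : String)
    (st : List (List (List (String × List (String × List String)))) × List (List (String × List (String × List String))))
    (ann : List (String × List (String × List String))) :
    List (List (List (String × List (String × List String)))) × List (List (String × List (String × List String))) :=
  let ann_type := annLabelD ann
  if ann_type == boundary_type then
    (if st.2.isEmpty then st.1 else st.1 ++ [st.2], [ann])
  else
    if st.2.isEmpty then (st.1, [ann]) else (st.1, st.2 ++ [ann])

def group_annotations (sorted_anns : List (List (String × List (String × List String)))) (boundary_type : String) : List (List (List (String × List (String × List String)))) :=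
  let st := sorted_anns.foldl (groupStep boundary_type) ([], [])
  if st.2.isEmpty then st.1 else st.1 ++ [st.2]

-- ===== PORT B =====
-- the outer while loop of Source B: each iteration emits the slice sorted_anns[i:j]
-- where j is the next boundary index (inner scan = takeWhile/dropWhile on the tail)
def notBoundary (boundary_type : String) (ann : List (String × List (String × List String))) : Bool :=
  !(annLabelD ann == boundary_type)

def altGo (boundary_type : String) : List (List (String × List (String × List String))) → List (List (List (String × List (String × List String))))
  | [] => []
  | h :: t =>
    (h :: t.takeWhile (notBoundary boundary_type)) :: altGo boundary_type (t.dropWhile (notBoundary boundary_type))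
termination_by xs => xs.length
decreasing_by
  simpa using Nat.lt_succ_of_le (List.length_dropWhile_le _ t)

def group_annotations_alt (sorted_anns : List (List (String × List (String × List String)))) (boundary_type : String) : List (List (List (String × List (String × List String)))) :=
  altGo boundary_type sorted_anns

-- ===== PRECONDITION & SPEC =====
-- Pre_ excludes exactly the inputs on which Python A raises: an annotation without a
-- "value" key (KeyError), with no "labels" key (.get returns None, then None[0] is a
-- TypeError), or with an empty labels list (IndexError).
def Pre_group_annotations (sorted_anns : List (List (String × List (String × List String)))) (boundary_type : String) : Prop :=
  ∀ ann ∈ sorted_anns, (annLabel? ann).isSome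
instance (sorted_anns : List (List (String × List (String × List String)))) (boundary_type : String) : Decidable (Pre_group_annotations sorted_anns boundary_type) := by unfold Pre_group_annotations; infer_instance

def pvWitness_group_annotations : (List (List (String × List (String × List String)))) × String :=
  ([[("value", [("labels", ["B"])])], [("value", [("labels", ["X"])])], [("value", [("labels", ["B"])])]], "B")

def Spec_group_annotations (sorted_anns : List (List (String × List (String × List String)))) (boundary_type : String) (out : List (List (List (String × List (String × List String))))) : Prop := out = group_annotations_alt sorted_anns boundary_type
instance (sorted_anns : List (List (String × List (String × List String)))) (boundary_type : String) (out : List (List (List (String × List (String × List String))))) : Decidable (Spec_group_annotations sorted_anns boundary_type out) := by unfold Spec_group_annotations; infer_instance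

-- ===== CLAIM (what is proved, stated in full; the proofs are below) =====
def Claim_equal_group_annotations : Prop := ∀ (sorted_anns : List (List (String × List (String × List String)))) (boundary_type : String), Dom_group_annotations sorted_anns boundary_type → Pre_group_annotations sorted_anns boundary_type → Spec_group_annotations sorted_anns boundary_type (group_annotations sorted_anns boundary_type)

-- ===== LEMMAS AND PROOFS =====

-- invariant of A's fold: from a nonempty current group `cur`, the finished result is
-- the groups so far, then `cur` extended by the non-boundary prefix, then B's groups
-- of the rest.
theorem fold_invariant (bt : String)
    (xs : List (List (String × List (String × List String))))
    (gs : List (List (List (String × List (String × List String)))))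
    (cur : List (List (String × List (String × List String)))) (hcur : ¬ cur.isEmpty) :
    (let st := xs.foldl (groupStep bt) (gs, cur)
     if st.2.isEmpty then st.1 else st.1 ++ [st.2]) =
    gs ++ (cur ++ xs.takeWhile (notBoundary bt)) :: altGo bt (xs.dropWhile (notBoundary bt)) := by
  induction xs generalizing gs cur with
  | nil => simp [altGo, hcur]
  | cons x xs ih =>
    by_cases hx : annLabelD x == bt
    · have hnb : notBoundary bt x = false := by simp [notBoundary, hx]
      have step : groupStep bt (gs, cur) x = (gs ++ [cur], [x]) := by
        simp [groupStep, hx, hcur]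
      rw [List.foldl_cons, step, ih (gs ++ [cur]) [x] (by simp)]
      simp [hnb, altGo]
    · have hnb : notBoundary bt x = true := by simp [notBoundary, hx]
      have step : groupStep bt (gs, cur) x = (gs, cur ++ [x]) := by
        simp [groupStep, hx, hcur]
      rw [List.foldl_cons, step, ih gs (cur ++ [x]) (by simp)]
      simp [hnb]

-- ===== VERDICT (by name: the statement is the Claim_ definition above) =====
theorem group_annotations_spec : Claim_equal_group_annotations := by
  intro sorted_anns bt _ _
  unfold Spec_group_annotations group_annotations group_annotations_alt
  cases sorted_anns with
  | nil => simp [altGo]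
  | cons h t =>
    have step0 : groupStep bt ([], []) h = ([], [h]) := by
      by_cases hx : annLabelD h == bt <;> simp [groupStep, hx]
    rw [List.foldl_cons, step0, fold_invariant bt t [] [h] (by simp)]
    simp [altGo]
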